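-- pv_equiv track=rewrite | github.com/StephMathis/challs-dev | battledev/BattleDevHelloWork-Mars-2020/2-Magicartes_Évolution_Platinium/soluce2.py | i_win
-- ===== SOURCE A (Python) =====
-- weakers = {}
--
-- strongers = {}
--
-- def i_win(mygame, sacha) :
--     if len(sacha) == 0 and len(mygame) > 0 :
--         return True
--     if len(mygame) == 0 :
--         return False
--     if mygame[0] in weakers and sacha[0] in weakers[mygame[0]] :
--         return i_win(mygame, sacha[1:])
--     if mygame[0] in strongers and sacha[0] in strongers[mygame[0]] :
--         return i_win(mygame[1:], sacha)
--     return i_win(mygame[1:], sacha[1:])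
-- ===== SOURCE B (Python) =====
-- # Since the module-level dicts `weakers` and `strongers` are empty, every round
-- # drops one card from each list; the winner is decided by who runs out first.
-- def i_win(mygame, sacha):
--     return len(mygame) > len(sacha)
-- ===== Notes on version B (the rewrite author's own statement) =====
-- stated objective: faster
-- what changed: The module's weakers/strongers dicts are empty, so A's recursion always drops one card from each list; B replaces the sliced recursion with the closed form len(mygame) > len(sacha).
import Mathlib
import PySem

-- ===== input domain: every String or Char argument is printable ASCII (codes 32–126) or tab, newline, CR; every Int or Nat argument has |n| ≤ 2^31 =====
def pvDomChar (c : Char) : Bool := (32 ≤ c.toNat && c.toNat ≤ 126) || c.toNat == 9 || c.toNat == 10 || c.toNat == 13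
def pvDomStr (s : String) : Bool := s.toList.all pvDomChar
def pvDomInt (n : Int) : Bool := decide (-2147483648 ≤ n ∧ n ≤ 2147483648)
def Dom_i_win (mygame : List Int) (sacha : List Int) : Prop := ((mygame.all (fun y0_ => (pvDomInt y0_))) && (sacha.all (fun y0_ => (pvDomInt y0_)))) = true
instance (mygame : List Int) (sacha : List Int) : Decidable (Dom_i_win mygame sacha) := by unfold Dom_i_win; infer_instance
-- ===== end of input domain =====

-- B computes the winner by the closed form len(mygame) > len(sacha) (valid since the
-- module's weakers/strongers dicts are empty), replacing A's sliced recursion.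

-- ===== PORT A =====
-- module-level:  weakers = {}  and  strongers = {}
def pvWeakers : PySem.Dict Int (List Int) := PySem.Dict.empty
def pvStrongers : PySem.Dict Int (List Int) := PySem.Dict.empty

def i_win (mygame : List Int) (sacha : List Int) : Bool :=
  if sacha.length == 0 && mygame.length > 0 then true
  else if mygame.length == 0 then false
  else
    match mygame, sacha with
    | m0 :: mt, s0 :: st =>
      -- `mygame[0] in weakers and sacha[0] in weakers[mygame[0]]`
      if (pvWeakers.get? m0).elim false (fun l => l.contains s0) then
        i_win (m0 :: mt) st
      else if (pvStrongers.get? m0).elim false (fun l => l.contains s0) then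
        i_win mt (s0 :: st)
      else
        i_win mt st
    | _, _ => false  -- unreachable: both guards above failed, so both lists are nonempty
termination_by mygame.length + sacha.length
decreasing_by all_goals (first | (simp; omega) | simp)

-- ===== PORT B =====
def i_win_alt (mygame : List Int) (sacha : List Int) : Bool :=
  decide (sacha.length < mygame.length)

-- ===== PRECONDITION & SPEC =====
def Spec_i_win (mygame : List Int) (sacha : List Int) (out : Bool) : Prop := out = i_win_alt mygame sacha
instance (mygame : List Int) (sacha : List Int) (out : Bool) : Decidable (Spec_i_win mygame sacha out) := by unfold Spec_i_win; infer_instance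

-- ===== CLAIM (what is proved, stated in full; the proofs are below) =====
def Claim_equal_i_win : Prop := ∀ (mygame : List Int) (sacha : List Int), Dom_i_win mygame sacha → Spec_i_win mygame sacha (i_win mygame sacha)

-- ===== LEMMAS AND PROOFS =====

theorem i_win_eq_closed (sacha mygame : List Int) :
    i_win mygame sacha = decide (sacha.length < mygame.length) := by
  induction sacha generalizing mygame with
  | nil =>
    cases mygame with
    | nil => simp [i_win]
    | cons m0 mt => simp [i_win]
  | cons s0 st ih =>
    cases mygame with
    | nil => simp [i_win]
    | cons m0 mt =>
      rw [i_win]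
      simp [pvWeakers, pvStrongers, PySem.Dict.empty, PySem.Dict.get?, ih]

-- ===== VERDICT (by name: the statement is the Claim_ definition above) =====
theorem i_win_spec : Claim_equal_i_win := by
  intro mygame sacha _
  unfold Spec_i_win i_win_alt
  exact i_win_eq_closed sacha mygame
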